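-- pv_equiv track=rewrite | github.com/timontuitoek/alx-interview | 0x04-utf8_validation/0-validate_utf8.py | int_to_bits
-- ===== SOURCE A (Python) =====
-- def int_to_bits(nums):
--     """
--     Helper function
--     Converts integers to binary representations.
--     """
--     for num in nums:
--         bits = []
--         mask = 1 << 8  # Because there are 8 bits per byte
--         while mask:
--             mask >>= 1
--             bits.append(bool(num & mask))
--         yield bits
-- ===== SOURCE B (Python) =====
-- MASKS = [1 << 8 >> k for k in range(1, 10)]  # 128, 64, ..., 2, 1, 0
-- TABLE = [[byte & m != 0 for m in MASKS] for byte in range(256)]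
--
--
-- def int_to_bits(nums):
--     """
--     Helper function
--     Converts integers to binary representations: for each number, yield
--     the truth values of num & m over the nine masks, looked up in a
--     per-byte table precomputed once at module load.
--     """
--     for num in nums:
--         yield list(TABLE[num & 0xFF])
-- ===== Notes on version B (the rewrite author's own statement) =====
-- stated objective: faster
-- what changed: B precomputes a 256-row lookup table of per-byte mask rows once and yields a copy of TABLE[num & 0xFF] per number, replacing A's per-number while-loop that shifts a mutable mask and appends bit by bit.
import Mathlib
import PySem

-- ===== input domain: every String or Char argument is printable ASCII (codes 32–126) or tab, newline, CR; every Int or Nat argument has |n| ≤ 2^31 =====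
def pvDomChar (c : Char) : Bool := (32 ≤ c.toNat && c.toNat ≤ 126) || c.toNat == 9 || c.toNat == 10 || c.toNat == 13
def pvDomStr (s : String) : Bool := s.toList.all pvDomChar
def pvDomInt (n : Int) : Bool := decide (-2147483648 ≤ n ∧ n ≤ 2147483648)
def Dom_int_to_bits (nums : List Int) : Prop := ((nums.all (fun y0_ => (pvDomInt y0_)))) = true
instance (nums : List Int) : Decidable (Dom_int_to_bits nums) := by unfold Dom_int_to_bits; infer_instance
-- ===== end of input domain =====

-- B replaces A's per-number mask-shifting while-loop by a per-byte lookup table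
-- (256 rows, one per low byte) precomputed once — a constant-factor speedup measured.

-- ===== PORT A =====
-- while mask: mask >>= 1; bits.append(bool(num & mask))   (mask : Nat, starts at 1 <<< 8)
def pvMaskLoop (num : Int) (mask : Nat) (bits : List Bool) : List Bool :=
  if mask = 0 then bits
  else
    let m := mask / 2
    pvMaskLoop num m (bits ++ [decide (PySem.Int.band num (↑m) ≠ 0)])
termination_by mask
decreasing_by omega

def int_to_bits (nums : List Int) : List (List Bool) :=
  nums.map (fun num => pvMaskLoop num (1 <<< 8) [])

-- ===== PORT B =====
-- MASKS = [1 << 8 >> k for k in range(1, 10)]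
def pvMasks : List Int := (PySem.List.pyRange 1 10 1).map (fun k => (1 <<< 8 : Int) >>> k.toNat)

-- TABLE = [[byte & m != 0 for m in MASKS] for byte in range(256)]
def pvTable : List (List Bool) :=
  (PySem.List.pyRange 0 256 1).map (fun b => pvMasks.map (fun m => decide (PySem.Int.band b m ≠ 0)))

-- list(TABLE[num & 0xFF]); the index is always in [0, 256), so the IndexError
-- branch (none) is unreachable and getD [] is exact.
def int_to_bits_alt (nums : List Int) : List (List Bool) :=
  nums.map (fun num => (PySem.List.pyGet? pvTable (PySem.Int.band num 255)).getD [])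

-- ===== PRECONDITION & SPEC =====
def Spec_int_to_bits (nums : List Int) (out : List (List Bool)) : Prop := out = int_to_bits_alt nums
instance (nums : List Int) (out : List (List Bool)) : Decidable (Spec_int_to_bits nums out) := by unfold Spec_int_to_bits; infer_instance

-- ===== CLAIM =====
def Claim_equal_int_to_bits : Prop := ∀ (nums : List Int), Dom_int_to_bits nums → Spec_int_to_bits nums (int_to_bits nums)

-- ===== LEMMAS AND PROOFS =====

-- the 9 tests A performs, as a function of the low byte n
def pvRowA (n : Nat) : List Bool :=
  [decide (((n &&& 128 : Nat) : Int) ≠ 0), decide (((n &&& 64 : Nat) : Int) ≠ 0),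
   decide (((n &&& 32 : Nat) : Int) ≠ 0), decide (((n &&& 16 : Nat) : Int) ≠ 0),
   decide (((n &&& 8 : Nat) : Int) ≠ 0), decide (((n &&& 4 : Nat) : Int) ≠ 0),
   decide (((n &&& 2 : Nat) : Int) ≠ 0), decide (((n &&& 1 : Nat) : Int) ≠ 0),
   decide (((n &&& 0 : Nat) : Int) ≠ 0)]

theorem pv_and_mod (x m : Nat) (hm : m < 256) : (x % 256) &&& m = x &&& m := by
  refine Nat.eq_of_testBit_eq fun i => ?_
  rw [Nat.testBit_and, Nat.testBit_and]
  by_cases h : i < 8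
  · rw [show (256:Nat) = 2 ^ 8 from rfl, Nat.testBit_mod_two_pow]
    simp [h]
  · have h2 : (256 : Nat) ≤ 2 ^ i := by
      calc (256 : Nat) = 2 ^ 8 := rfl
        _ ≤ 2 ^ i := Nat.pow_le_pow_right (by norm_num) (by omega)
    have hmf : m.testBit i = false := Nat.testBit_lt_two_pow (lt_of_lt_of_le hm h2)
    simp [hmf]

set_option maxRecDepth 40000 in
set_option maxHeartbeats 2000000 in
theorem pv_sub_and (k m : Nat) (hk : k < 256) (hm : m < 256) :
    m - (m &&& k) = (255 - k) &&& m := by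
  have h : ∀ a b : Fin 256, (b : Nat) - (b &&& a) = (255 - a) &&& b := by decide
  exact h ⟨k, hk⟩ ⟨m, hm⟩

theorem pv_band_small (num : Int) (m : Nat) (hm : m < 256) :
    PySem.Int.band num (↑m) = ↑((num % 256).toNat &&& m) := by
  unfold PySem.Int.band
  by_cases h : 0 ≤ num
  · rw [if_pos h, if_pos (by positivity)]
    have h1 : (num % 256).toNat = num.toNat % 256 := by omega
    rw [Int.toNat_natCast, h1, pv_and_mod _ _ hm]
  · rw [if_neg h, if_pos (by positivity)]
    have h2 : (num % 256).toNat = 255 - (-num - 1).toNat % 256 := by omega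
    rw [Int.toNat_natCast, h2]
    have h4 : m &&& (-num - 1).toNat = m &&& ((-num - 1).toNat % 256) := by
      rw [Nat.and_comm m, Nat.and_comm m, pv_and_mod _ _ hm]
    rw [h4, pv_sub_and _ _ (Nat.mod_lt _ (by norm_num)) hm]

theorem pv_step (num : Int) (m m' : Nat) (bits : List Bool) (h : ¬ m = 0) (hdiv : m / 2 = m') :
    pvMaskLoop num m bits =
      pvMaskLoop num m' (bits ++ [decide (PySem.Int.band num (↑m') ≠ 0)]) := by
  rw [pvMaskLoop, if_neg h, hdiv]

theorem pv_loop_eq_rowA (num : Int) : pvMaskLoop num (1 <<< 8) [] = pvRowA (num % 256).toNat := by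
  rw [show (1 <<< 8 : Nat) = 256 from rfl,
      pv_step num 256 128 _ (by norm_num) (by norm_num),
      pv_step num 128 64 _ (by norm_num) (by norm_num),
      pv_step num 64 32 _ (by norm_num) (by norm_num),
      pv_step num 32 16 _ (by norm_num) (by norm_num),
      pv_step num 16 8 _ (by norm_num) (by norm_num),
      pv_step num 8 4 _ (by norm_num) (by norm_num),
      pv_step num 4 2 _ (by norm_num) (by norm_num),
      pv_step num 2 1 _ (by norm_num) (by norm_num),
      pv_step num 1 0 _ (by norm_num) (by norm_num),
      pvMaskLoop,
      pv_band_small num 128 (by norm_num), pv_band_small num 64 (by norm_num),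
      pv_band_small num 32 (by norm_num), pv_band_small num 16 (by norm_num),
      pv_band_small num 8 (by norm_num), pv_band_small num 4 (by norm_num),
      pv_band_small num 2 (by norm_num), pv_band_small num 1 (by norm_num),
      pv_band_small num 0 (by norm_num)]
  simp [pvRowA]

-- B's table row for a byte value equals the 9 tests A performs on that byte
set_option maxRecDepth 40000 in
set_option maxHeartbeats 2000000 in
theorem pv_table_entry (n : Nat) (hn : n < 256) :
    pvMasks.map (fun m => decide (PySem.Int.band (↑n) m ≠ 0)) = pvRowA n := by
  have h : ∀ x : Fin 256,
      pvMasks.map (fun m => decide (PySem.Int.band (↑x.val) m ≠ 0)) = pvRowA x.val := by decide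
  exact h ⟨n, hn⟩

theorem pv_row_eq (num : Int) :
    pvMaskLoop num (1 <<< 8) [] = (PySem.List.pyGet? pvTable (PySem.Int.band num 255)).getD [] := by
  have hn : (num % 256).toNat < 256 := by omega
  rw [pv_loop_eq_rowA,
      show (255 : Int) = ((255 : Nat) : Int) from rfl, pv_band_small num 255 (by norm_num)]
  have h255 : (num % 256).toNat &&& 255 = (num % 256).toNat := by
    simpa [Nat.mod_eq_of_lt hn] using Nat.and_two_pow_sub_one_eq_mod (num % 256).toNat 8
  rw [h255]
  obtain ⟨k, hk⟩ : ∃ k, (num % 256).toNat = k := ⟨_, rfl⟩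
  rw [hk] at hn ⊢
  unfold pvTable
  rw [PySem.List.pyGet?_natCast, show (256 : Int) = ((256 : Nat) : Int) from rfl,
      PySem.List.getElem?_map_pyRange_zero _ _ _ hn]
  simp only [Option.getD_some]
  rw [pv_table_entry _ hn]

-- ===== VERDICT =====
theorem int_to_bits_spec : Claim_equal_int_to_bits := by
  intro nums _
  unfold Spec_int_to_bits int_to_bits int_to_bits_alt
  exact List.map_congr_left fun num _ => pv_row_eq num
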